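-- pv_equiv track=rewrite | github.com/mortyc126-debug/SHA-256 | exp21_nonlinear_channel.py | carry_vec
-- ===== SOURCE A (Python) =====
-- def carry_vec(a, b):
--     carries = []
--     c = 0
--     for i in range(32):
--         s = ((a>>i)&1)+((b>>i)&1)+c
--         c = 1 if s>=2 else 0
--         carries.append(c)
--     return carries
-- ===== SOURCE B (Python) =====
-- def carry_vec(a, b):
--     # carry out of bit i = floor((a mod 2^(i+1) + b mod 2^(i+1)) / 2^(i+1)), computed
--     # independently per position instead of propagating a carry sequentially
--     return [((a % (1 << (i + 1))) + (b % (1 << (i + 1)))) >> (i + 1) for i in range(32)]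
-- ===== Notes on version B (the rewrite author's own statement) =====
-- stated objective: simpler
-- what changed: Replaced the sequential 32-step carry-propagation loop with a one-line comprehension computing each carry independently by the closed form carry_i = (a mod 2^(i+1) + b mod 2^(i+1)) >> (i+1).
import Mathlib
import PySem

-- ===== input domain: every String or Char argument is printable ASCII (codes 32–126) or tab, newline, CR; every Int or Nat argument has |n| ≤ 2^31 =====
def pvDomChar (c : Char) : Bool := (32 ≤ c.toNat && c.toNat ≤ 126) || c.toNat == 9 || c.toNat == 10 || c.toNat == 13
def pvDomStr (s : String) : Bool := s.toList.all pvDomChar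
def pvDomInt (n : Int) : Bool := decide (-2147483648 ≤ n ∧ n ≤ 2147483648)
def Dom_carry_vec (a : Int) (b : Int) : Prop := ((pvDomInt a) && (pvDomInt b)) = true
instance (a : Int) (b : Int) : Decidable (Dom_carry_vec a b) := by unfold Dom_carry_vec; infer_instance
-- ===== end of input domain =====

-- B replaces A's sequential carry-propagation loop by an independent per-bit closed form (simpler); return values proved equal for all Int inputs.

-- ===== PORT A =====
-- A: sequential full-adder loop carrying c from bit to bit, appending each carry.
def carry_vec (a : Int) (b : Int) : List Int :=
  ((List.range 32).foldl
    (fun (st : List Int × Int) (i : Nat) =>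
      let s : Int := PySem.Int.band (a >>> i) 1 + PySem.Int.band (b >>> i) 1 + st.2
      let c : Int := if s ≥ 2 then 1 else 0
      (st.1 ++ [c], c))
    ([], 0)).1

-- ===== PORT B =====
-- B: each carry computed independently: ((a % 2^(i+1)) + (b % 2^(i+1))) >> (i+1).
def carry_vec_alt (a : Int) (b : Int) : List Int :=
  (List.range 32).map (fun (i : Nat) =>
    (PySem.Int.mod a ((1:Int) <<< (i + 1)) + PySem.Int.mod b ((1:Int) <<< (i + 1))) >>> (i + 1))

-- ===== PRECONDITION & SPEC =====
def Spec_carry_vec (a : Int) (b : Int) (out : List Int) : Prop := out = carry_vec_alt a b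
instance (a : Int) (b : Int) (out : List Int) : Decidable (Spec_carry_vec a b out) := by unfold Spec_carry_vec; infer_instance

-- ===== CLAIM (what is proved, stated in full; the proofs are below) =====
def Claim_equal_carry_vec : Prop := ∀ (a : Int) (b : Int), Dom_carry_vec a b → Spec_carry_vec a b (carry_vec a b)

-- ===== LEMMAS AND PROOFS =====

-- the closed-form carry out of the low n bits
def carryC (a b : Int) (n : Nat) : Int := (a % 2 ^ n + b % 2 ^ n) / 2 ^ n

theorem carryC_zero (a b : Int) : carryC a b 0 = 0 := by
  simp [carryC]

theorem ediv_of_decomp (q r d x : Int) (hd : 0 < d) (h0 : 0 ≤ r) (h1 : r < d)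
    (hx : x = q * d + r) : x / d = q := by
  subst hx
  rw [add_comm, Int.add_mul_ediv_right _ _ (ne_of_gt hd),
    Int.ediv_eq_zero_of_lt h0 h1, zero_add]

-- splitting an emod at a power of two
theorem emod_pow_succ (a : Int) (n : Nat) :
    a % 2 ^ (n + 1) = a % 2 ^ n + (a / 2 ^ n) % 2 * 2 ^ n := by
  have hp : (0 : Int) < 2 ^ n := by positivity
  have hx : a = (a / 2 ^ n / 2) * 2 ^ (n + 1) + (a % 2 ^ n + (a / 2 ^ n) % 2 * 2 ^ n) := by
    have h1 : 2 ^ n * (a / 2 ^ n) + a % 2 ^ n = a := Int.ediv_add_emod a (2 ^ n)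
    have h2 : 2 * (a / 2 ^ n / 2) + (a / 2 ^ n) % 2 = a / 2 ^ n := Int.ediv_add_emod _ 2
    have h3 := congrArg (fun t => 2 ^ n * t + a % 2 ^ n) h2
    simp only at h3
    rw [h1] at h3
    rw [pow_succ]
    linarith [h3]
  have h0 : 0 ≤ a % 2 ^ n + (a / 2 ^ n) % 2 * 2 ^ n := by
    have := Int.emod_nonneg a (ne_of_gt hp)
    have h2 := Int.emod_nonneg (a / 2 ^ n) (by norm_num : (2:Int) ≠ 0)
    positivity
  have h1 : a % 2 ^ n + (a / 2 ^ n) % 2 * 2 ^ n < 2 ^ (n + 1) := by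
    have hr := Int.emod_lt_of_pos a hp
    have hm : (a / 2 ^ n) % 2 < 2 := Int.emod_lt_of_pos _ (by norm_num)
    have hm0 : 0 ≤ (a / 2 ^ n) % 2 := Int.emod_nonneg _ (by norm_num)
    have : (a / 2 ^ n) % 2 * 2 ^ n ≤ 1 * 2 ^ n :=
      mul_le_mul_of_nonneg_right (by omega) (le_of_lt hp)
    rw [pow_succ]
    nlinarith
  calc a % 2 ^ (n + 1)
      = ((a / 2 ^ n / 2) * 2 ^ (n + 1) + (a % 2 ^ n + (a / 2 ^ n) % 2 * 2 ^ n)) % 2 ^ (n + 1) := by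
        rw [← hx]
    _ = (a % 2 ^ n + (a / 2 ^ n) % 2 * 2 ^ n) % 2 ^ (n + 1) := by
        rw [add_comm, Int.add_mul_emod_self_right]
    _ = a % 2 ^ n + (a / 2 ^ n) % 2 * 2 ^ n := Int.emod_eq_of_lt h0 h1

-- the pure full-adder arithmetic, with all bit values explicit
theorem carry_arith (p xa xb cp r : Int) (hp : 0 < p)
    (hxa : xa = 0 ∨ xa = 1) (hxb : xb = 0 ∨ xb = 1) (hcp : cp = 0 ∨ cp = 1)
    (hr0 : 0 ≤ r) (hrp : r < p) :
    (xa * p + xb * p + cp * p + r) / (2 * p) = if xa + xb + cp ≥ 2 then 1 else 0 := by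
  rcases hxa with rfl | rfl <;> rcases hxb with rfl | rfl <;> rcases hcp with rfl | rfl
  · rw [if_neg (by norm_num)]
    exact ediv_of_decomp 0 r _ _ (by linarith) hr0 (by linarith) (by ring)
  · rw [if_neg (by norm_num)]
    exact ediv_of_decomp 0 (p + r) _ _ (by linarith) (by linarith) (by linarith) (by ring)
  · rw [if_neg (by norm_num)]
    exact ediv_of_decomp 0 (p + r) _ _ (by linarith) (by linarith) (by linarith) (by ring)
  · rw [if_pos (by norm_num)]
    exact ediv_of_decomp 1 r _ _ (by linarith) hr0 (by linarith) (by ring)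
  · rw [if_neg (by norm_num)]
    exact ediv_of_decomp 0 (p + r) _ _ (by linarith) (by linarith) (by linarith) (by ring)
  · rw [if_pos (by norm_num)]
    exact ediv_of_decomp 1 r _ _ (by linarith) hr0 (by linarith) (by ring)
  · rw [if_pos (by norm_num)]
    exact ediv_of_decomp 1 r _ _ (by linarith) hr0 (by linarith) (by ring)
  · rw [if_pos (by norm_num)]
    exact ediv_of_decomp 1 (p + r) _ _ (by linarith) (by linarith) (by linarith) (by ring)

-- the carry recursion satisfied by the closed form
theorem carryC_succ (a b : Int) (n : Nat) :
    carryC a b (n + 1) =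
      if (a / 2 ^ n) % 2 + (b / 2 ^ n) % 2 + carryC a b n ≥ 2 then 1 else 0 := by
  have hp : (0 : Int) < 2 ^ n := by positivity
  have hra0 : 0 ≤ a % 2 ^ n := Int.emod_nonneg a (ne_of_gt hp)
  have hrap : a % 2 ^ n < 2 ^ n := Int.emod_lt_of_pos a hp
  have hrb0 : 0 ≤ b % 2 ^ n := Int.emod_nonneg b (ne_of_gt hp)
  have hrbp : b % 2 ^ n < 2 ^ n := Int.emod_lt_of_pos b hp
  have hxa : (a / 2 ^ n) % 2 = 0 ∨ (a / 2 ^ n) % 2 = 1 := by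
    have := Int.emod_nonneg (a / 2 ^ n) (by norm_num : (2:Int) ≠ 0)
    have := Int.emod_lt_of_pos (a / 2 ^ n) (by norm_num : (0:Int) < 2)
    omega
  have hxb : (b / 2 ^ n) % 2 = 0 ∨ (b / 2 ^ n) % 2 = 1 := by
    have := Int.emod_nonneg (b / 2 ^ n) (by norm_num : (2:Int) ≠ 0)
    have := Int.emod_lt_of_pos (b / 2 ^ n) (by norm_num : (0:Int) < 2)
    omega
  have hd : 2 ^ n * (carryC a b n) + (a % 2 ^ n + b % 2 ^ n) % 2 ^ n
      = a % 2 ^ n + b % 2 ^ n := Int.ediv_add_emod _ _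
  have hr0 : 0 ≤ (a % 2 ^ n + b % 2 ^ n) % 2 ^ n := Int.emod_nonneg _ (ne_of_gt hp)
  have hrp : (a % 2 ^ n + b % 2 ^ n) % 2 ^ n < 2 ^ n := Int.emod_lt_of_pos _ hp
  have hcp : carryC a b n = 0 ∨ carryC a b n = 1 := by
    have hub : carryC a b n * 2 ^ n < 2 * 2 ^ n := by nlinarith
    have hlb : (-1) * 2 ^ n < carryC a b n * 2 ^ n := by nlinarith
    have h1 := lt_of_mul_lt_mul_right hub (le_of_lt hp)
    have h2 := lt_of_mul_lt_mul_right hlb (le_of_lt hp)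
    omega
  have e : a % 2 ^ (n + 1) + b % 2 ^ (n + 1)
      = (a / 2 ^ n) % 2 * 2 ^ n + (b / 2 ^ n) % 2 * 2 ^ n + carryC a b n * 2 ^ n
        + (a % 2 ^ n + b % 2 ^ n) % 2 ^ n := by
    have ha := emod_pow_succ a n
    have hb := emod_pow_succ b n
    linarith [ha, hb, hd]
  show (a % 2 ^ (n + 1) + b % 2 ^ (n + 1)) / 2 ^ (n + 1) = _
  rw [e, show (2:Int) ^ (n + 1) = 2 * 2 ^ n from by ring]
  exact carry_arith (2 ^ n) _ _ _ _ hp hxa hxb hcp hr0 hrp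

-- A's loop-body bit equals the emod/ediv bit
theorem band_shift_bit (a : Int) (n : Nat) :
    PySem.Int.band (a >>> n) 1 = (a / 2 ^ n) % 2 := by
  rw [PySem.Int.band_one, PySem.Int.mod_eq_emod_of_pos (by norm_num : (0:Int) < 2),
    Int.shiftRight_eq_div_pow]
  norm_cast

-- the loop invariant: after n iterations the list holds carryC (i+1) for i < n and c = carryC n
theorem loop_inv (a b : Int) (n : Nat) :
    (List.range n).foldl
      (fun (st : List Int × Int) (i : Nat) =>
        let s : Int := PySem.Int.band (a >>> i) 1 + PySem.Int.band (b >>> i) 1 + st.2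
        let c : Int := if s ≥ 2 then 1 else 0
        (st.1 ++ [c], c))
      ([], 0) =
    ((List.range n).map (fun i => carryC a b (i + 1)), carryC a b n) := by
  induction n with
  | zero => simp [carryC_zero]
  | succ n ih =>
    rw [List.range_succ, List.foldl_append, ih, List.map_append]
    simp only [List.foldl_cons, List.foldl_nil, List.map_cons, List.map_nil]
    rw [band_shift_bit a n, band_shift_bit b n]
    rw [← carryC_succ a b n]

-- B's closed form per index equals carryC (i+1)
theorem alt_elem (a b : Int) (i : Nat) :
    (PySem.Int.mod a ((1:Int) <<< (i + 1)) + PySem.Int.mod b ((1:Int) <<< (i + 1))) >>> (i + 1) =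
      carryC a b (i + 1) := by
  have hsl : (1 : Int) <<< (i + 1) = 2 ^ (i + 1) := by
    rw [Int.shiftLeft_eq]; ring
  have hp : (0 : Int) < 2 ^ (i + 1) := by positivity
  rw [hsl, PySem.Int.mod_eq_emod_of_pos hp, PySem.Int.mod_eq_emod_of_pos hp,
    Int.shiftRight_eq_div_pow]
  show _ = (a % 2 ^ (i+1) + b % 2 ^ (i+1)) / 2 ^ (i+1)
  norm_cast

-- ===== VERDICT (by name: the statement is the Claim_ definition above) =====
theorem carry_vec_spec : Claim_equal_carry_vec := by
  intro a b _
  show carry_vec a b = carry_vec_alt a b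
  unfold carry_vec carry_vec_alt
  rw [loop_inv a b 32]
  dsimp only
  exact List.map_congr_left (fun i _ => (alt_elem a b i).symm)
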